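-- pv_equiv track=rewrite | github.com/nordic-institute/X-Road-Metrics | anonymizer_module/opmon_anonymizer/tests/test_opendata_anonymizer.py | _set_projection
-- ===== SOURCE A (Python) =====
-- from typing import Dict, List, Optional, Union
--
-- def _set_projection(projection: Optional[dict] = None,
--                     data: Optional[List[dict]] = None
--                     ) -> List[Dict[str, Union[str, int]]]:
--     if projection is None:
--         projection = {}
--     if data is None:
--         data = []
--     projected_data = []
--     for item in data:
--         new_item = {}
--         for field, value in projection.items():
--             if value is True and field in item:
--                 new_item[field] = item[field]
--         if new_item:
--             projected_data.append(new_item)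
--     return projected_data
-- ===== SOURCE B (Python) =====
-- def _set_projection(projection=None, data=None):
--     items = list(data or [])
--     acc = [{} for _ in items]
--     for field, value in (projection or {}).items():
--         if value is True:
--             for i, item in enumerate(items):
--                 if field in item:
--                     acc[i][field] = item[field]
--     return [d for d in acc if d]
-- ===== Notes on version B (the rewrite author's own statement) =====
-- stated objective: alternative
-- what changed: B traverses field-major instead of item-major: the outer loop runs over the projection's fields and the inner loop over the documents, filling a parallel list of per-document accumulators column by column (correct because projection keys are distinct, so each accumulator receives its fields in projection order, exactly A's per-item dict), and a final pass drops empty accumulators; A nests a per-item scan of the whole projection inside the document loop.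
import Mathlib
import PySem

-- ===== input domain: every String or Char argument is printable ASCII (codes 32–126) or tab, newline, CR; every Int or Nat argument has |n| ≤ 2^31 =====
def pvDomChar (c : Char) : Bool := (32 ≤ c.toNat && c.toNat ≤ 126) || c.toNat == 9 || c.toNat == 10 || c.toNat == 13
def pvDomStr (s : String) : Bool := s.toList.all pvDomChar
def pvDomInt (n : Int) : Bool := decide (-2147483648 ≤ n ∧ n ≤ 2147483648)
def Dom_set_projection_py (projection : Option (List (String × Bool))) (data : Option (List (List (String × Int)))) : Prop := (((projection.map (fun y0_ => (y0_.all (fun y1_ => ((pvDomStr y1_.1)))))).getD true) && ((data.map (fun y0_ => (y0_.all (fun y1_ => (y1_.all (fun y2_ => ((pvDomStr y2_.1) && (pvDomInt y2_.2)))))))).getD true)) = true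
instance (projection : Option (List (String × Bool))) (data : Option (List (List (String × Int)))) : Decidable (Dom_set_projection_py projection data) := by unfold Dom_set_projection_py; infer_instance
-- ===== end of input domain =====

-- B is an alternative field-major traversal (same cost): outer loop over projection fields,
-- inner pass over the documents, filling parallel per-document accumulators; equivalence of
-- the RETURN values is proved (neither program mutates its arguments).

-- ===== PORT A =====
-- Literal transliteration of A; Python dict arguments arrive as association lists read
-- through PySem.Dict.ofList (= dict(pairs)); the inner loop over projection.items()
-- inserts into a Dict, and 'if new_item:' keeps only non-empty dicts.
def set_projection_py (projection : Option (List (String × Bool))) (data : Option (List (List (String × Int)))) : List (List (String × Int)) :=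
  let proj := PySem.Dict.ofList (projection.getD [])
  let dataL := data.getD []
  dataL.foldl (fun projected_data item =>
    let itemD := PySem.Dict.ofList item
    let new_item := proj.items.foldl (fun ni fv =>
      if fv.2 == true && itemD.contains fv.1 then ni.insert fv.1 (itemD.getD fv.1 0) else ni)
      PySem.Dict.empty
    if !new_item.items.isEmpty then projected_data ++ [new_item.items] else projected_data) []

-- ===== PORT B =====
-- Transliteration of B (field-major): outer fold over projection.items(); for True fields the
-- inner pass updates each document's accumulator in the parallel list 'acc' (Python's
-- enumerate-and-index update is rendered as zipping acc with items and mapping); finally the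
-- non-empty accumulators are kept, in document order.
def set_projection_py_alt (projection : Option (List (String × Bool))) (data : Option (List (List (String × Int)))) : List (List (String × Int)) :=
  let items := (data.getD [])
  let acc0 := items.map (fun _ => (PySem.Dict.empty : PySem.Dict String Int))
  let accF := (PySem.Dict.ofList (projection.getD [])).items.foldl
    (fun acc fv =>
      if fv.2 == true then
        (acc.zip items).map (fun p =>
          if (PySem.Dict.ofList p.2).contains fv.1
          then p.1.insert fv.1 ((PySem.Dict.ofList p.2).getD fv.1 0) else p.1)
      else acc) acc0
  (accF.filter (fun d => !d.items.isEmpty)).map (fun d => d.items)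

-- ===== PRECONDITION & SPEC =====
def Spec_set_projection_py (projection : Option (List (String × Bool))) (data : Option (List (List (String × Int)))) (out : List (List (String × Int))) : Prop := out = set_projection_py_alt projection data
instance (projection : Option (List (String × Bool))) (data : Option (List (List (String × Int)))) (out : List (List (String × Int))) : Decidable (Spec_set_projection_py projection data out) := by unfold Spec_set_projection_py; infer_instance

-- ===== CLAIM (what is proved, stated in full; the proofs are below) =====
def Claim_equal_set_projection_py : Prop := ∀ (projection : Option (List (String × Bool))) (data : Option (List (List (String × Int)))), Dom_set_projection_py projection data → Spec_set_projection_py projection data (set_projection_py projection data)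

-- ===== LEMMAS AND PROOFS =====

-- mapping over ((items.map h).zip items)
theorem pv_zip_self_map {α β γ : Type} (items : List α) (h : α → β) (g : β × α → γ) :
    ((items.map h).zip items).map g = items.map (fun it => g (h it, it)) := by
  induction items with
  | nil => simp
  | cons a l ih => simp [ih]

-- the field-major fold equals the per-document (item-major) fold, done pointwise
theorem pv_col (items : List (List (String × Int))) (l : List (String × Bool)) :
    ∀ h : List (String × Int) → PySem.Dict String Int,
    l.foldl (fun acc fv =>
        if fv.2 == true then
          (acc.zip items).map (fun p =>
            if (PySem.Dict.ofList p.2).contains fv.1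
            then p.1.insert fv.1 ((PySem.Dict.ofList p.2).getD fv.1 0) else p.1)
        else acc) (items.map h)
      = items.map (fun item => l.foldl (fun d fv =>
          if fv.2 == true && (PySem.Dict.ofList item).contains fv.1
          then d.insert fv.1 ((PySem.Dict.ofList item).getD fv.1 0) else d) (h item)) := by
  induction l with
  | nil => intro h; simp
  | cons fv l ih =>
    intro h
    by_cases hv : (fv.2 == true) = true
    · simp only [List.foldl_cons, if_pos hv, pv_zip_self_map]
      rw [ih (fun it =>
        if (PySem.Dict.ofList it).contains fv.1
        then (h it).insert fv.1 ((PySem.Dict.ofList it).getD fv.1 0) else h it)]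
      refine List.map_congr_left (fun item _ => ?_)
      simp [hv]
    · simp only [List.foldl_cons, if_neg hv]
      rw [ih h]
      refine List.map_congr_left (fun item _ => ?_)
      congr 1
      simp [hv]

theorem set_projection_py_spec_aux (projection : Option (List (String × Bool))) (data : Option (List (List (String × Int)))) :
    set_projection_py projection data = set_projection_py_alt projection data := by
  unfold set_projection_py set_projection_py_alt
  simp only []
  rw [PySem.List.foldl_append_if, pv_col, List.filter_map]
  simp [Function.comp_def, List.map_map]

-- ===== VERDICT (by name: the statement is the Claim_ definition above) =====
theorem set_projection_py_spec : Claim_equal_set_projection_py := by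
  intro projection data _
  exact set_projection_py_spec_aux projection data
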